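-- pv_equiv track=rewrite | github.com/PFCCLab/paddlefx | src/paddlefx/bytecode_transformation.py | encode_exception_table_varint
-- ===== SOURCE A (Python) =====
-- def encode_exception_table_varint(n):
--     """Similar to `encode_varint`, but the 6-bit chunks are ordered in reverse."""
--     assert n >= 0
--     b = [n & 63]
--     n >>= 6
--     while n > 0:
--         b.append(n & 63)
--         n >>= 6
--     b = list(reversed(b))
--     for i in range(len(b) - 1):
--         b[i] |= 64
--     return b
-- ===== SOURCE B (Python) =====
-- def encode_exception_table_varint(n):
--     """Similar to `encode_varint`, but the 6-bit chunks are ordered in reverse."""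
--     assert n >= 0
--     k = max(1, (n.bit_length() + 5) // 6)
--     out = []
--     for i in range(k):
--         c = (n >> (6 * (k - 1 - i))) & 63
--         if i < k - 1:
--             c |= 64
--         out.append(c)
--     return out
-- ===== Notes on version B (the rewrite author's own statement) =====
-- stated objective: alternative
-- what changed: Instead of collecting little-endian chunks in a loop, reversing, and patching continuation bits in a second pass, B computes the chunk count from bit_length and emits the chunks most-significant-first in one pass with the continuation bit set inline.
import Mathlib
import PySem

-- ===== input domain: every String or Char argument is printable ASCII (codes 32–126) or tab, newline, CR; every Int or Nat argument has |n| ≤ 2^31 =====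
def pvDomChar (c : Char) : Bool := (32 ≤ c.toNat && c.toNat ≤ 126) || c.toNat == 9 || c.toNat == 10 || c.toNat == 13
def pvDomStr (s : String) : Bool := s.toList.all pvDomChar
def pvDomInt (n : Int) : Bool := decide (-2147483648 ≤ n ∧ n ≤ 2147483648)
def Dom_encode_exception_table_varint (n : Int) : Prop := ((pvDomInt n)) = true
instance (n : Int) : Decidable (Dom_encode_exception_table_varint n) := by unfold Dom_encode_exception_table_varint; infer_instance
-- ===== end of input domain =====

-- B emits the 6-bit chunks most-significant-first in one pass (chunk count from bit_length),
-- where A collects them little-endian, reverses, and patches continuation bits in a second pass.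

-- ===== PORT A =====
-- the `while n > 0` loop; on 0 ≤ q, Python's `q >> 6` = q / 64 and `q & 63` = q % 64 (Euclidean / floor agree for the positive divisor)
def encVarintLoop (q : Int) (b : List Int) : List Int :=
  if _h : 0 < q then encVarintLoop (q / 64) (b ++ [q % 64]) else b
termination_by q.toNat
decreasing_by omega

def encode_exception_table_varint (n : Int) : List Int :=
  let b := encVarintLoop (n / 64) [n % 64]        -- b = [n & 63] then the loop
  let r := b.reverse                               -- b = list(reversed(b))
  r.mapIdx (fun i x => if i < r.length - 1 then Int.lor x 64 else x)  -- for i in range(len(b)-1): b[i] |= 64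

-- ===== PORT B =====
-- k = max(1, (n.bit_length() + 5) // 6): bit_length of the nonnegative n is Nat.size n.toNat;
-- n >> s = n / 2^s and & 63 = % 64 on 0 ≤ n, as above
def encode_exception_table_varint_alt (n : Int) : List Int :=
  let k : Nat := max 1 ((Nat.size n.toNat + 5) / 6)
  (List.range k).map (fun i =>
    let c : Int := (n / (2 : Int) ^ (6 * (k - 1 - i))) % 64
    if i < k - 1 then Int.lor c 64 else c)

-- ===== PRECONDITION & SPEC =====
-- A's `assert n >= 0` raises AssertionError on negative n; Pre_ excludes exactly those inputs.
def Pre_encode_exception_table_varint (n : Int) : Prop := 0 ≤ n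
instance (n : Int) : Decidable (Pre_encode_exception_table_varint n) := by unfold Pre_encode_exception_table_varint; infer_instance
def pvWitness_encode_exception_table_varint : Int := 4097

def Spec_encode_exception_table_varint (n : Int) (out : List Int) : Prop := out = encode_exception_table_varint_alt n
instance (n : Int) (out : List Int) : Decidable (Spec_encode_exception_table_varint n out) := by unfold Spec_encode_exception_table_varint; infer_instance

-- ===== CLAIM (what is proved, stated in full; the proofs are below) =====
def Claim_equal_encode_exception_table_varint : Prop := ∀ (n : Int), Dom_encode_exception_table_varint n → Pre_encode_exception_table_varint n → Spec_encode_exception_table_varint n (encode_exception_table_varint n)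

-- ===== LEMMAS AND PROOFS =====

-- reference: high chunks of q, MSB-first, each with the continuation bit
def encHigh (q : Int) : List Int :=
  if _h : 0 < q then encHigh (q / 64) ++ [Int.lor (q % 64) 64] else []
termination_by q.toNat
decreasing_by omega

-- little-endian tail chunks of q
def tailChunks (q : Int) : List Int :=
  if _h : 0 < q then q % 64 :: tailChunks (q / 64) else []
termination_by q.toNat
decreasing_by omega

theorem encVarintLoop_eq (q : Int) (b : List Int) :
    encVarintLoop q b = b ++ tailChunks q := by
  fun_induction encVarintLoop q b with
  | case1 q b h ih =>
      rw [tailChunks, dif_pos h, ih]; simp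
  | case2 q b h =>
      rw [tailChunks, dif_neg h]; simp

theorem tailChunks_rev (q : Int) :
    ((tailChunks q).reverse).map (fun x => Int.lor x 64) = encHigh q := by
  fun_induction tailChunks q with
  | case1 q h ih =>
      rw [encHigh, dif_pos h]; simp [ih]
  | case2 q h =>
      rw [encHigh, dif_neg h]; simp

theorem mapIdx_orlast (t : List Int) (a : Int) :
    (t ++ [a]).mapIdx (fun i x => if i < (t ++ [a]).length - 1 then Int.lor x 64 else x)
      = t.map (fun x => Int.lor x 64) ++ [a] := by
  apply List.ext_getElem
  · simp
  · intro i h1 h2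
    simp only [List.getElem_mapIdx, List.length_append, List.length_cons, List.length_nil]
    rcases Nat.lt_or_ge i t.length with hi | hi
    · rw [List.getElem_append_left hi, List.getElem_append_left (by simpa using hi)]
      simp only [List.getElem_map]
      rw [if_pos (by omega)]
    · have hit : i = t.length := by
        simp only [List.length_mapIdx, List.length_append, List.length_cons, List.length_nil] at h1
        omega
      subst hit
      rw [List.getElem_append_right (le_refl _), List.getElem_append_right (by simp)]
      simp

theorem A_eq (n : Int) :
    encode_exception_table_varint n = encHigh (n / 64) ++ [n % 64] := by
  show (((encVarintLoop (n / 64) [n % 64]).reverse).mapIdx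
      (fun i x => if i < (encVarintLoop (n / 64) [n % 64]).reverse.length - 1 then Int.lor x 64 else x))
      = _
  rw [encVarintLoop_eq]
  simp only [List.reverse_append, List.reverse_cons, List.reverse_nil, List.nil_append]
  rw [mapIdx_orlast, tailChunks_rev]

theorem encHigh_zero : encHigh 0 = [] := by
  rw [encHigh]; simp

-- the chunk expressions B emits coincide with encHigh plus the barless last chunk, under exact bounds on q
theorem B_core : ∀ (k : Nat) (q : Int), 0 ≤ q → q < 64 ^ k → 1 ≤ k → (k = 1 ∨ 64 ^ (k - 1) ≤ q) →
    (List.range k).map (fun i =>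
        let c : Int := (q / (2 : Int) ^ (6 * (k - 1 - i))) % 64
        if i < k - 1 then Int.lor c 64 else c)
      = encHigh (q / 64) ++ [q % 64] := by
  intro k
  induction k with
  | zero => omega
  | succ k' ih =>
    intro q hq hub _ hlb
    rcases Nat.eq_zero_or_pos k' with hk0 | hk1
    · subst hk0
      have hq64 : q < 64 := by simpa using hub
      have h0 : q / 64 = 0 := by omega
      rw [h0, encHigh_zero]
      simp
    · -- k = k' + 1 with k' ≥ 1
      have hklb : (64 : Int) ^ k' ≤ q := by
        rcases hlb with h | h
        · omega
        · simpa using h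
      have hq' : 0 ≤ q / 64 := by omega
      have hub' : q / 64 < 64 ^ k' := by
        have hp : (64 : Int) ^ (k' + 1) = 64 ^ k' * 64 := by ring
        omega
      have hlb' : k' = 1 ∨ (64 : Int) ^ (k' - 1) ≤ q / 64 := by
        right
        have hp : (64 : Int) ^ k' = 64 ^ (k' - 1) * 64 := by
          rw [← pow_succ]; congr 1; omega
        omega
      have hpos : 0 < q / 64 := by
        have h64 : (64 : Int) ≤ 64 ^ k' := by
          calc (64 : Int) = 64 ^ 1 := (pow_one _).symm
            _ ≤ 64 ^ k' := pow_le_pow_right₀ (by norm_num) hk1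
        omega
      have ihq := ih (q / 64) hq' hub' hk1 hlb'
      have hk'eq : k' - 1 + 1 = k' := by omega
      have hrange : List.range k' = List.range (k' - 1) ++ [k' - 1] := by
        conv_lhs => rw [← hk'eq]
        exact List.range_succ
      have hdivdiv : ∀ i : Nat, i < k' →
          q / (2 : Int) ^ (6 * (k' - i)) = (q / 64) / (2 : Int) ^ (6 * (k' - 1 - i)) := by
        intro i hi
        have h1 : 6 * (k' - i) = 6 + 6 * (k' - 1 - i) := by omega
        rw [h1, pow_add, ← Int.ediv_ediv_of_nonneg (by norm_num : (0:Int) ≤ 2 ^ 6)]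
        norm_num
      -- peel the last element i = k' (no continuation bit)
      rw [List.range_succ, List.map_append, List.map_cons, List.map_nil]
      simp only [Nat.add_sub_cancel, Nat.sub_self, Nat.mul_zero, pow_zero, Int.ediv_one,
        lt_self_iff_false, if_false]
      congr 1
      -- pieces of the IH
      rw [hrange, List.map_append, List.map_cons, List.map_nil] at ihq
      simp only [Nat.sub_self, Nat.mul_zero, pow_zero, Int.ediv_one, lt_self_iff_false,
        if_false] at ihq
      obtain ⟨ihL, _⟩ := List.append_inj' ihq (by simp)
      rw [hrange, List.map_append, List.map_cons, List.map_nil]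
      conv_rhs => rw [encHigh, dif_pos hpos]
      congr 1
      · rw [← ihL]
        apply List.map_congr_left
        intro i hi
        simp only [List.mem_range] at hi
        simp only [hdivdiv i (by omega)]
        rw [if_pos (by omega), if_pos (by omega)]
      · have h1 : 6 * (k' - (k' - 1)) = 6 := by omega
        simp only [h1]
        rw [if_pos (by omega)]
        norm_num

-- k = max 1 ((size m + 5) / 6) is exactly the chunk count of m
theorem size_bounds (m : Nat) :
    m < 64 ^ (max 1 ((Nat.size m + 5) / 6)) ∧
    (max 1 ((Nat.size m + 5) / 6) = 1 ∨ 64 ^ (max 1 ((Nat.size m + 5) / 6) - 1) ≤ m) := by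
  set s := Nat.size m with hs
  set k := max 1 ((s + 5) / 6) with hk
  have h64 : ∀ e : Nat, (64 : Nat) ^ e = 2 ^ (6 * e) := by
    intro e; rw [pow_mul]; norm_num
  constructor
  · have hsk : s ≤ 6 * k := by omega
    calc m < 2 ^ s := Nat.lt_size_self m
      _ ≤ 2 ^ (6 * k) := Nat.pow_le_pow_right (by norm_num) hsk
      _ = 64 ^ k := (h64 k).symm
  · rcases Nat.eq_or_lt_of_le (le_max_left 1 ((s + 5) / 6)) with h1 | h2
    · left; omega
    · right
      have hk2 : k = (s + 5) / 6 := by omega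
      have hs7 : 7 ≤ s := by omega
      have hle : 6 * (k - 1) ≤ s - 1 := by omega
      have hm : 2 ^ (s - 1) ≤ m := by
        rw [← Nat.lt_size]; omega
      calc (64 : Nat) ^ (k - 1) = 2 ^ (6 * (k - 1)) := h64 _
        _ ≤ 2 ^ (s - 1) := Nat.pow_le_pow_right (by norm_num) hle
        _ ≤ m := hm

theorem B_eq (n : Int) (hn : 0 ≤ n) :
    encode_exception_table_varint_alt n = encHigh (n / 64) ++ [n % 64] := by
  show (List.range (max 1 ((Nat.size n.toNat + 5) / 6))).map _ = _
  have hb := size_bounds n.toNat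
  set k := max 1 ((Nat.size n.toNat + 5) / 6) with hk
  have hub : n < (64 : Int) ^ k := by
    have h1 := hb.1
    have hcast : ((64 ^ k : Nat) : Int) = (64 : Int) ^ k := by push_cast; ring
    omega
  have hlb : k = 1 ∨ (64 : Int) ^ (k - 1) ≤ n := by
    rcases hb.2 with h | h
    · left; exact h
    · right
      have hcast : ((64 ^ (k - 1) : Nat) : Int) = (64 : Int) ^ (k - 1) := by push_cast; ring
      omega
  exact B_core k n hn hub (le_max_left 1 _) hlb

-- ===== VERDICT (by name: the statement is the Claim_ definition above) =====
theorem encode_exception_table_varint_spec : Claim_equal_encode_exception_table_varint := by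
  intro n _ hpre
  unfold Spec_encode_exception_table_varint
  rw [A_eq, B_eq n hpre]
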